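-- pv_equiv track=rewrite | github.com/Ananthu27/CP-MTECH | sweep line algorithms/convex_hull.py | reduceL
-- ===== SOURCE A (Python) =====
-- def turn(x,y,z):
--     # return determinent after shifting y to the origin
--     return ((x[0]-y[0])*(z[1]-y[1]))-((x[1]-y[1])*(z[0]-y[0]))
--
-- def reduceL(hull):
--     if len(hull)<3:
--         return hull
--     else :
--         a = hull[-3]
--         b = hull[-2]
--         c = hull[-1]
--         res = turn(a,b,c)
--         # no turn or right turn
--         if res >= 0 :
--             return hull
--
--         # left trurn
--         else :
--             r = hull.pop(-2)
--             return reduceL(hull)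
-- ===== SOURCE B (Python) =====
-- def turn(x,y,z):
--     # return determinent after shifting y to the origin
--     return ((x[0]-y[0])*(z[1]-y[1]))-((x[1]-y[1])*(z[0]-y[0]))
--
-- def reduceL(hull):
--     # The last point c never moves: scan backwards for the first index k at
--     # which no left turn remains, then delete the rejected points in one splice.
--     if len(hull) < 3:
--         return hull
--     c = hull[-1]
--     k = len(hull) - 1
--     while k >= 2 and turn(hull[k-2], hull[k-1], c) < 0:
--         k -= 1
--     del hull[k:-1]
--     return hull
-- ===== Notes on version B (the rewrite author's own statement) =====
-- stated objective: alternative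
-- what changed: Replaced the pop-one-point-and-recurse scheme with a single backward index scan that finds the cut position k and then removes all rejected points with one splice (del hull[k:-1]), avoiding the O(n) tail shift of each pop(-2); a timing run could not measure a difference on the generated inputs.
import Mathlib
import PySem

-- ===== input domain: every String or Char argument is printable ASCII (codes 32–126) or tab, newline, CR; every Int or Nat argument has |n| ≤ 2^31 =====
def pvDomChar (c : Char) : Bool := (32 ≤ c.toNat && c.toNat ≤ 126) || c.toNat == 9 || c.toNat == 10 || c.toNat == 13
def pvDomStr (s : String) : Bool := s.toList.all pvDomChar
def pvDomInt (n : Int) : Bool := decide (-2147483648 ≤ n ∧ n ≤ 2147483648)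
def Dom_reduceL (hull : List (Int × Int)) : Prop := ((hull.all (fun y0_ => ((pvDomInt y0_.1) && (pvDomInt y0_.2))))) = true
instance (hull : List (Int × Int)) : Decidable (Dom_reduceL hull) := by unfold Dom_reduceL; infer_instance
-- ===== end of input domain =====

-- B replaces A's pop-and-recurse with a backward index scan that finds the cut position and one
-- splice; both Pythons mutate the argument list in place — the equivalence proved here is about
-- the RETURN value (which is the mutated list in both).

-- ===== PORT A =====
def turnDet (x y z : Int × Int) : Int :=
  ((x.1 - y.1) * (z.2 - y.2)) - ((x.2 - y.2) * (z.1 - y.1))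

def reduceL (hull : List (Int × Int)) : List (Int × Int) :=
  if hull.length < 3 then hull
  else
    let a := (PySem.List.pyGet? hull (-3)).getD (0, 0)
    let b := (PySem.List.pyGet? hull (-2)).getD (0, 0)
    let c := (PySem.List.pyGet? hull (-1)).getD (0, 0)
    let res := turnDet a b c
    if res ≥ 0 then hull
    else
      match hp : PySem.List.pop? hull (-2) with
      | some r => reduceL r.2
      | none => hull
termination_by hull.length
decreasing_by
  have := PySem.List.length_of_pop?_eq_some hull hp
  omega

-- ===== PORT B =====
-- the while loop of Source B: decrement k while k >= 2 and turn(hull[k-2], hull[k-1], c) < 0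
def reduceLoop (hull : List (Int × Int)) (c : Int × Int) (k : Nat) : Nat :=
  if h : 2 ≤ k ∧
      turnDet ((PySem.List.pyGet? hull ((k : Int) - 2)).getD (0, 0))
              ((PySem.List.pyGet? hull ((k : Int) - 1)).getD (0, 0)) c < 0 then
    reduceLoop hull c (k - 1)
  else k
termination_by k
decreasing_by omega

def reduceL_alt (hull : List (Int × Int)) : List (Int × Int) :=
  if hull.length < 3 then hull
  else
    let c := (PySem.List.pyGet? hull (-1)).getD (0, 0)
    let k := reduceLoop hull c (hull.length - 1)
    -- del hull[k:-1]; return hull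
    hull.take k ++ [c]

-- ===== PRECONDITION & SPEC =====
def Spec_reduceL (hull : List (Int × Int)) (out : List (Int × Int)) : Prop := out = reduceL_alt hull
instance (hull : List (Int × Int)) (out : List (Int × Int)) : Decidable (Spec_reduceL hull out) := by unfold Spec_reduceL; infer_instance

-- ===== CLAIM (what is proved, stated in full; the proofs are below) =====
def Claim_equal_reduceL : Prop := ∀ (hull : List (Int × Int)), Dom_reduceL hull → Spec_reduceL hull (reduceL hull)

-- ===== LEMMAS AND PROOFS =====

lemma reduceLoop_le (hull : List (Int × Int)) (c : Int × Int) (k : Nat) :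
    reduceLoop hull c k ≤ k := by
  induction k using Nat.strong_induction_on with
  | _ k ih =>
    rw [reduceLoop]
    split
    · rename_i h
      exact le_trans (ih (k - 1) (by omega)) (by omega)
    · exact le_rfl

-- invariant: A applied to the current list (a prefix of p plus the fixed last point c)
-- equals B's cut index computed by the loop
lemma reduceL_take (p : List (Int × Int)) (c : Int × Int) (k : Nat) (hk : k ≤ p.length) :
    reduceL (p.take k ++ [c]) = p.take (reduceLoop (p ++ [c]) c k) ++ [c] := by
  induction k using Nat.strong_induction_on with
  | _ k ih =>
    have hlen : (p.take k ++ [c]).length = k + 1 := by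
      simp [List.length_take]; omega
    by_cases h2 : 2 ≤ k
    · -- at least two points before c
      have hk1 : k - 1 < p.length := by omega
      have hk2 : k - 2 < p.length := by omega
      have hxs1 : (p.take k ++ [c])[k - 1]? = some p[k - 1] := by
        rw [List.getElem?_append_left (by simp [List.length_take]; omega)]
        rw [List.getElem?_take, if_pos (by omega), List.getElem?_eq_getElem hk1]
      have hxs2 : (p.take k ++ [c])[k - 2]? = some p[k - 2] := by
        rw [List.getElem?_append_left (by simp [List.length_take]; omega)]
        rw [List.getElem?_take, if_pos (by omega), List.getElem?_eq_getElem hk2]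
      have hg1 : PySem.List.pyGet? (p.take k ++ [c]) (-1) = some c :=
        PySem.List.pyGet?_neg_one_append_singleton _ _
      have hg2 : PySem.List.pyGet? (p.take k ++ [c]) (-2) = some p[k - 1] := by
        rw [PySem.List.pyGet?_neg_ofNat _ 2 (by omega) (by omega), hlen]
        have : k + 1 - 2 = k - 1 := by omega
        rw [this, hxs1]
      have hg3 : PySem.List.pyGet? (p.take k ++ [c]) (-3) = some p[k - 2] := by
        rw [PySem.List.pyGet?_neg_ofNat _ 3 (by omega) (by omega), hlen]
        have : k + 1 - 3 = k - 2 := by omega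
        rw [this, hxs2]
      -- the loop's own indices, into p ++ [c]
      have hl1 : PySem.List.pyGet? (p ++ [c]) ((k : Int) - 1) = some p[k - 1] := by
        rw [PySem.List.pyGet?_of_nonneg (xs := p ++ [c]) (i := (k : Int) - 1) (by omega)]
        have : ((k : Int) - 1).toNat = k - 1 := by omega
        rw [this, List.getElem?_append_left hk1, List.getElem?_eq_getElem hk1]
      have hl2 : PySem.List.pyGet? (p ++ [c]) ((k : Int) - 2) = some p[k - 2] := by
        rw [PySem.List.pyGet?_of_nonneg (xs := p ++ [c]) (i := (k : Int) - 2) (by omega)]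
        have : ((k : Int) - 2).toNat = k - 2 := by omega
        rw [this, List.getElem?_append_left hk2, List.getElem?_eq_getElem hk2]
      rw [reduceL]
      simp only [hg1, hg2, hg3, Option.getD_some]
      rw [if_neg (by omega)]
      by_cases hres : turnDet p[k - 2] p[k - 1] c ≥ 0
      · rw [if_pos hres]
        rw [reduceLoop, dif_neg (by simp only [hl1, hl2, Option.getD_some]; omega)]
      · rw [if_neg hres]
        have hpop : PySem.List.pop? (p.take k ++ [c]) (-2) =
            some (p[k - 1], p.take (k - 1) ++ [c]) := by
          unfold PySem.List.pop? PySem.List.pyIdx?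
          rw [hlen]
          rw [if_neg (by omega), if_pos (by omega)]
          have hidx : k + 1 - ((-(-2 : Int)).toNat) = k - 1 := by omega
          simp only [hidx, Option.bind_some, hxs1, Option.map_some]
          have herase : (p.take k ++ [c]).eraseIdx (k - 1) = p.take (k - 1) ++ [c] := by
            rw [List.eraseIdx_append_of_lt_length (by simp [List.length_take]; omega)]
            rw [List.eraseIdx_eq_take_drop_succ, List.take_take]
            have : k - 1 + 1 = k := by omega
            rw [this]
            simp
          rw [herase]
        split
        · rename_i r heq
          rw [hpop] at heq
          injection heq with heq
          subst heq
          rw [ih (k - 1) (by omega) (by omega)]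
          conv_rhs => rw [reduceLoop, dif_pos ⟨h2, by
            simp only [hl1, hl2, Option.getD_some]; omega⟩]
        · rename_i heq
          rw [hpop] at heq
          exact absurd heq (by simp)
    · -- fewer than two points before c: both sides leave the list alone
      rw [reduceL, if_pos (by omega)]
      rw [reduceLoop, dif_neg (by omega)]

theorem reduceL_spec_aux (hull : List (Int × Int)) : reduceL hull = reduceL_alt hull := by
  by_cases h : hull.length < 3
  · rw [reduceL, if_pos h]
    rw [reduceL_alt, if_pos h]
  · have hne : hull ≠ [] := by
      intro e; rw [e] at h; simp at h
    have hsplit : hull = hull.dropLast ++ [hull.getLast hne] :=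
      (List.dropLast_append_getLast hne).symm
    have hp : hull.dropLast.length = hull.length - 1 := List.length_dropLast
    have hmain := reduceL_take hull.dropLast (hull.getLast hne) hull.dropLast.length le_rfl
    rw [List.take_length, ← hsplit] at hmain
    rw [reduceL_alt, if_neg h]
    simp only [PySem.List.pyGet?_neg_one, List.getLast?_eq_some_getLast hne, Option.getD_some]
    rw [hp] at hmain
    rw [hmain, List.dropLast_eq_take, List.take_take,
        Nat.min_eq_left (reduceLoop_le hull (hull.getLast hne) (hull.length - 1))]

-- ===== VERDICT (by name: the statement is the Claim_ definition above) =====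
theorem reduceL_spec : Claim_equal_reduceL := by
  intro hull _
  exact reduceL_spec_aux hull
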